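-- pv_equiv track=rewrite | github.com/sunbyte16/100-Day-Coding-Sprint | Day-27/Total Cards.py | user_logic
-- ===== SOURCE A (Python) =====
-- def user_logic(n, positions_cards):
--     # Separate positions into left and right
--     left = []
--     right = []
--
--     for p, c in positions_cards:
--         if p < 0:
--             left.append((p, c))
--         elif p > 0:
--             right.append((p, c))
--
--     # Sort:
--     # Left: closest to 0 first → descending
--     # Right: closest to 0 first → ascending
--     left.sort(reverse=True)
--     right.sort()
--
--     def simulate(start_right):
--         i = j = 0
--         total = 0
--         turn_right = start_right
--
--         while True:
--             if turn_right:
--                 if j < len(right):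
--                     total += right[j][1]
--                     j += 1
--                 else:
--                     break
--             else:
--                 if i < len(left):
--                     total += left[i][1]
--                     i += 1
--                 else:
--                     break
--             turn_right = not turn_right
--
--         return total
--
--     # Try both starting directions
--     return max(simulate(True), simulate(False))
-- ===== SOURCE B (Python) =====
-- def user_logic(n, positions_cards):
--     left = sorted(((p, c) for p, c in positions_cards if p < 0), reverse=True)
--     right = sorted((p, c) for p, c in positions_cards if p > 0)
--
--     def start_sum(x, y):
--         # starting on side x, the alternating walk takes min(len(x), len(y)+1)
--         # cards from x and min(len(y), len(x)) cards from y
--         return sum(c for _, c in x[:min(len(x), len(y) + 1)]) + \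
--                sum(c for _, c in y[:min(len(y), len(x))])
--
--     return max(start_sum(right, left), start_sum(left, right))
-- ===== Notes on version B (the rewrite author's own statement) =====
-- stated objective: simpler
-- what changed: Replaces the iterative alternating-pickup simulation with a closed-form count (starting side takes min(x, y+1) cards, the other min(y, x)) summed over slices of the same sorted sides.
import Mathlib
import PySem

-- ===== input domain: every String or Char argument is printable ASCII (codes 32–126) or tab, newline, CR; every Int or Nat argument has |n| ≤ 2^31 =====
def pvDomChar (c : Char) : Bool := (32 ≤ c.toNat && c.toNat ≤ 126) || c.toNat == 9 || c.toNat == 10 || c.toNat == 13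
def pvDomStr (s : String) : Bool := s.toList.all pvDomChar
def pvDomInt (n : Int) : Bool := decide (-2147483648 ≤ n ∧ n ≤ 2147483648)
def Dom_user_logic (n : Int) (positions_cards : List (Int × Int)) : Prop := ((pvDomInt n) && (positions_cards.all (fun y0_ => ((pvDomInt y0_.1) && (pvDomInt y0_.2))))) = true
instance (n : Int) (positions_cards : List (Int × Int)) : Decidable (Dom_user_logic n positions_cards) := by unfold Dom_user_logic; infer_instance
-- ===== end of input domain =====

-- B replaces A's iterative alternating-pickup simulation with a closed-form pick count
-- over slices of the same sorted sides (objective: simpler).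

-- ===== PORT A =====
-- A's inner 'simulate': while-loop over indices j (into right) and i (into left)
def simulateA (right left : List (Int × Int)) (i j : Nat) (total : Int) (turn_right : Bool) : Int :=
  if turn_right then
    if h : j < right.length then
      simulateA right left i (j + 1) (total + right[j].2) false
    else total
  else
    if h : i < left.length then
      simulateA right left (i + 1) j (total + left[i].2) true
    else total
termination_by (right.length - j) + (left.length - i)
decreasing_by all_goals omega

def user_logic (n : Int) (positions_cards : List (Int × Int)) : Int :=
  let pair := positions_cards.foldl
    (fun (acc : List (Int × Int) × List (Int × Int)) pc =>
      if pc.1 < 0 then (acc.1 ++ [pc], acc.2)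
      else if pc.1 > 0 then (acc.1, acc.2 ++ [pc])
      else acc) ([], [])
  let left := PySem.List.sorted2 pair.1 Prod.fst Prod.snd true
  let right := PySem.List.sorted2 pair.2 Prod.fst Prod.snd false
  max (simulateA right left 0 0 0 true) (simulateA right left 0 0 0 false)

-- ===== PORT B =====
-- Source B's inner 'start_sum': closed-form pick counts over slices
def startSumB (x y : List (Int × Int)) : Int :=
  ((x.take (min x.length (y.length + 1))).map Prod.snd).sum +
  ((y.take (min y.length x.length)).map Prod.snd).sum

def user_logic_alt (n : Int) (positions_cards : List (Int × Int)) : Int :=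
  let left := PySem.List.sorted2 (positions_cards.filter (fun pc => pc.1 < 0)) Prod.fst Prod.snd true
  let right := PySem.List.sorted2 (positions_cards.filter (fun pc => pc.1 > 0)) Prod.fst Prod.snd false
  max (startSumB right left) (startSumB left right)

-- ===== PRECONDITION & SPEC =====
def Spec_user_logic (n : Int) (positions_cards : List (Int × Int)) (out : Int) : Prop := out = user_logic_alt n positions_cards
instance (n : Int) (positions_cards : List (Int × Int)) (out : Int) : Decidable (Spec_user_logic n positions_cards out) := by unfold Spec_user_logic; infer_instance

-- ===== CLAIM (what is proved, stated in full; the proofs are below) =====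
def Claim_equal_user_logic : Prop := ∀ (n : Int) (positions_cards : List (Int × Int)), Dom_user_logic n positions_cards → Spec_user_logic n positions_cards (user_logic n positions_cards)

-- ===== LEMMAS AND PROOFS =====

-- proof-side restatement of A's simulation on the suffix lists right.drop j / left.drop i
def simD : List (Int × Int) → List (Int × Int) → Bool → Int
  | [], _, true => 0
  | r :: rs, L, true => r.2 + simD rs L false
  | _, [], false => 0
  | R, l :: ls, false => l.2 + simD R ls true
termination_by R L _ => R.length + L.length

lemma simulateA_eq_simD (right left : List (Int × Int)) (i j : Nat) (total : Int) (b : Bool) :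
    simulateA right left i j total b = total + simD (right.drop j) (left.drop i) b := by
  fun_induction simulateA right left i j total b with
  | case1 i j total h ih =>
      rw [ih, List.drop_eq_getElem_cons h, simD]
      ring
  | case2 i j total h =>
      rw [show right.drop j = ([] : List (Int × Int)) from List.drop_eq_nil_of_le (by omega), simD]
      ring
  | case3 i j total b hb h ih =>
      simp only [Bool.not_eq_true] at hb; subst hb
      rw [ih, List.drop_eq_getElem_cons h]
      conv_rhs => rw [simD]
      ring
  | case4 i j total b hb h =>
      simp only [Bool.not_eq_true] at hb; subst hb
      rw [show left.drop i = ([] : List (Int × Int)) from List.drop_eq_nil_of_le (by omega), simD]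
      ring

lemma simD_eq_startSum (R L : List (Int × Int)) (b : Bool) :
    simD R L b = if b then startSumB R L else startSumB L R := by
  fun_induction simD R L b with
  | case1 L => simp [startSumB]
  | case2 r rs L ih =>
      simp only [Bool.false_eq_true, reduceIte] at ih
      rw [ih]
      simp only [reduceIte, startSumB, List.length_cons]
      have h1 : min (rs.length + 1) (L.length + 1) = min rs.length L.length + 1 := by omega
      rw [h1, List.take_succ_cons, List.map_cons, List.sum_cons]
      ring
  | case3 R => simp [startSumB]
  | case4 R l ls ih =>
      simp only [reduceIte] at ih
      rw [ih]
      simp only [Bool.false_eq_true, reduceIte, startSumB, List.length_cons]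
      have h1 : min (ls.length + 1) (R.length + 1) = min ls.length R.length + 1 := by omega
      rw [h1, List.take_succ_cons, List.map_cons, List.sum_cons]
      ring

lemma split_foldl (pcs : List (Int × Int)) (l r : List (Int × Int)) :
    pcs.foldl
      (fun (acc : List (Int × Int) × List (Int × Int)) pc =>
        if pc.1 < 0 then (acc.1 ++ [pc], acc.2)
        else if pc.1 > 0 then (acc.1, acc.2 ++ [pc])
        else acc) (l, r)
    = (l ++ pcs.filter (fun pc => pc.1 < 0), r ++ pcs.filter (fun pc => pc.1 > 0)) := by
  induction pcs generalizing l r with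
  | nil => simp
  | cons pc rest ih =>
      by_cases h1 : pc.1 < 0
      · have h2 : ¬ pc.1 > 0 := by omega
        simp [h1, h2, ih]
      · by_cases h2 : pc.1 > 0
        · simp [h1, h2, ih]
        · simp [h1, h2, ih]

-- ===== VERDICT (by name: the statement is the Claim_ definition above) =====
theorem user_logic_spec : Claim_equal_user_logic := by
  intro n pcs _
  show user_logic n pcs = user_logic_alt n pcs
  unfold user_logic user_logic_alt
  simp only [split_foldl, List.nil_append]
  rw [simulateA_eq_simD, simulateA_eq_simD]
  simp [List.drop_zero, simD_eq_startSum]
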